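-- pv_equiv track=rewrite | github.com/spidervirus/FutureSelf | future-self/backend/main.py | detect_emotional_context
-- ===== SOURCE A (Python) =====
-- def detect_emotional_context(message: str) -> str:
--     message_lower = message.lower()
--
--     # Stress/Anxiety patterns
--     if any(word in message_lower for word in ['stressed', 'anxious', 'worried', 'overwhelmed', 'scared', 'panic']):
--         return "You sense your current self is feeling overwhelmed. You remember this feeling well."
--
--     # Excitement/Joy patterns
--     elif any(word in message_lower for word in ['excited', 'happy', 'amazing', 'great', 'wonderful', 'fantastic']):
--         return "You feel your current self's excitement and it brings back memories of your own journey."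
--
--     # Confusion/Uncertainty patterns
--     elif any(word in message_lower for word in ['confused', 'lost', 'stuck', 'don\'t know', 'unsure', 'help']):
--         return "You recognize this uncertainty - you've been exactly where they are now."
--
--     # Sadness/Disappointment patterns
--     elif any(word in message_lower for word in ['sad', 'disappointed', 'failed', 'giving up', 'hopeless']):
--         return "You feel your current self's pain and remember when you felt the same way."
--
--     # Goal/Ambition patterns
--     elif any(word in message_lower for word in ['goal', 'dream', 'want to', 'planning', 'future', 'hope']):
--         return "You smile, remembering when you had these same aspirations."
--
--     return "You listen with the understanding that comes from having lived through similar experiences."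
-- ===== SOURCE B (Python) =====
-- RESPONSES = [
--     "You sense your current self is feeling overwhelmed. You remember this feeling well.",
--     "You feel your current self's excitement and it brings back memories of your own journey.",
--     "You recognize this uncertainty - you've been exactly where they are now.",
--     "You feel your current self's pain and remember when you felt the same way.",
--     "You smile, remembering when you had these same aspirations.",
--     "You listen with the understanding that comes from having lived through similar experiences.",
-- ]
--
-- # keyword -> index of its category's response; first-match in A = minimum matched index here
-- KEYWORD_CATEGORY = {
--     'stressed': 0, 'anxious': 0, 'worried': 0, 'overwhelmed': 0, 'scared': 0, 'panic': 0,
--     'excited': 1, 'happy': 1, 'amazing': 1, 'great': 1, 'wonderful': 1, 'fantastic': 1,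
--     'confused': 2, 'lost': 2, 'stuck': 2, "don't know": 2, 'unsure': 2, 'help': 2,
--     'sad': 3, 'disappointed': 3, 'failed': 3, 'giving up': 3, 'hopeless': 3,
--     'goal': 4, 'dream': 4, 'want to': 4, 'planning': 4, 'future': 4, 'hope': 4,
-- }
--
--
-- def detect_emotional_context(message: str) -> str:
--     message_lower = message.lower()
--     best = len(RESPONSES) - 1  # default: the fallback response
--     for word, cat in KEYWORD_CATEGORY.items():
--         if cat < best and word in message_lower:
--             best = cat
--     return RESPONSES[best]
-- ===== Notes on version B (the rewrite author's own statement) =====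
-- stated objective: alternative
-- what changed: Replaces the five-branch if/elif chain of any()-scans with a single flat pass over a keyword-to-category dict that keeps the minimum matched category index in an accumulator, then indexes once into a response table; first-match priority becomes a minimum computation.
import Mathlib
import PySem

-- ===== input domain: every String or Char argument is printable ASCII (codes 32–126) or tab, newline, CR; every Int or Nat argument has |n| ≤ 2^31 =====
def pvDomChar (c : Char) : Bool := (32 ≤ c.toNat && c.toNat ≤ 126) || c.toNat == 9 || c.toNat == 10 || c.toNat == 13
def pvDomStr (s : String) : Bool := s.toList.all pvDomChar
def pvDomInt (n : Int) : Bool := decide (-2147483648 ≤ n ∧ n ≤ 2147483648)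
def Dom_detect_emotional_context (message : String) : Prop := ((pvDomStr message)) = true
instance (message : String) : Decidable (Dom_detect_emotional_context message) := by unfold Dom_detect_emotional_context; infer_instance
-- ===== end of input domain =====

-- ===== PORT A =====
-- B replaces A's if/elif chain by a flat min-accumulator pass over a keyword→category dict plus one table lookup (alternative; same cost).
def detect_emotional_context (message : String) : String :=
  let message_lower := PySem.Str.lower message
  if (["stressed", "anxious", "worried", "overwhelmed", "scared", "panic"].any
      (fun word => PySem.Str.isIn word message_lower)) then
    "You sense your current self is feeling overwhelmed. You remember this feeling well."
  else if (["excited", "happy", "amazing", "great", "wonderful", "fantastic"].any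
      (fun word => PySem.Str.isIn word message_lower)) then
    "You feel your current self's excitement and it brings back memories of your own journey."
  else if (["confused", "lost", "stuck", "don't know", "unsure", "help"].any
      (fun word => PySem.Str.isIn word message_lower)) then
    "You recognize this uncertainty - you've been exactly where they are now."
  else if (["sad", "disappointed", "failed", "giving up", "hopeless"].any
      (fun word => PySem.Str.isIn word message_lower)) then
    "You feel your current self's pain and remember when you felt the same way."
  else if (["goal", "dream", "want to", "planning", "future", "hope"].any
      (fun word => PySem.Str.isIn word message_lower)) then
    "You smile, remembering when you had these same aspirations."
  else
    "You listen with the understanding that comes from having lived through similar experiences."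

-- ===== PORT B =====
def pvResponses : List String :=
  [ "You sense your current self is feeling overwhelmed. You remember this feeling well.",
    "You feel your current self's excitement and it brings back memories of your own journey.",
    "You recognize this uncertainty - you've been exactly where they are now.",
    "You feel your current self's pain and remember when you felt the same way.",
    "You smile, remembering when you had these same aspirations.",
    "You listen with the understanding that comes from having lived through similar experiences." ]

-- the KEYWORD_CATEGORY dict, in insertion order (all keys distinct)
def pvKeywordCat : List (String × Nat) :=
  [ ("stressed", 0), ("anxious", 0), ("worried", 0), ("overwhelmed", 0), ("scared", 0), ("panic", 0),
    ("excited", 1), ("happy", 1), ("amazing", 1), ("great", 1), ("wonderful", 1), ("fantastic", 1),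
    ("confused", 2), ("lost", 2), ("stuck", 2), ("don't know", 2), ("unsure", 2), ("help", 2),
    ("sad", 3), ("disappointed", 3), ("failed", 3), ("giving up", 3), ("hopeless", 3),
    ("goal", 4), ("dream", 4), ("want to", 4), ("planning", 4), ("future", 4), ("hope", 4) ]

def pvStep (m : String) (best : Nat) (p : String × Nat) : Nat :=
  if p.2 < best && PySem.Str.isIn p.1 m then p.2 else best

def detect_emotional_context_alt (message : String) : String :=
  let message_lower := PySem.Str.lower message
  let best := pvKeywordCat.foldl (pvStep message_lower) (pvResponses.length - 1)
  -- RESPONSES[best]: best ≤ 5 always holds, so the index is in range and getD is exact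
  pvResponses.getD best ""

-- ===== PRECONDITION & SPEC =====
def Spec_detect_emotional_context (message : String) (out : String) : Prop := out = detect_emotional_context_alt message
instance (message : String) (out : String) : Decidable (Spec_detect_emotional_context message out) := by unfold Spec_detect_emotional_context; infer_instance

-- ===== CLAIM (what is proved, stated in full; the proofs are below) =====
def Claim_equal_detect_emotional_context : Prop := ∀ (message : String), Dom_detect_emotional_context message → Spec_detect_emotional_context message (detect_emotional_context message)

-- ===== LEMMAS AND PROOFS =====

theorem pvFold_const (m : String) (c : Nat) (ws : List (String × Nat))
    (h : ∀ p ∈ ws, p.2 = c) (best : Nat) :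
    ws.foldl (pvStep m) best
      = if c < best ∧ ws.any (fun p => PySem.Str.isIn p.1 m) then c else best := by
  induction ws generalizing best with
  | nil => simp
  | cons p rest ih =>
    have hp : p.2 = c := h p (List.mem_cons_self ..)
    have hrest : ∀ q ∈ rest, q.2 = c := fun q hq => h q (List.mem_cons_of_mem _ hq)
    simp only [List.foldl_cons, List.any_cons, pvStep, hp]
    by_cases hc : c < best
    · by_cases hmm : PySem.Chars.isIn p.1.toList m.toList = true
      · rw [if_pos (by simp [hc, hmm]), ih hrest c]
        simp [hc, hmm]
      · have hf : PySem.Chars.isIn p.1.toList m.toList = false := by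
          simpa using hmm
        have hfs : PySem.Str.isIn p.1 m = false := by simp [hf]
        rw [if_neg (by simp [hf]), ih hrest best]
        simp only [hfs, Bool.false_or]
    · rw [if_neg (by simp [hc]), ih hrest best]
      simp [hc]


theorem pvChain (b0 b1 b2 b3 b4 : Bool) :
    (if b0 = true then "You sense your current self is feeling overwhelmed. You remember this feeling well." else if b1 = true then "You feel your current self's excitement and it brings back memories of your own journey." else if b2 = true then "You recognize this uncertainty - you've been exactly where they are now." else if b3 = true then "You feel your current self's pain and remember when you felt the same way." else if b4 = true then "You smile, remembering when you had these same aspirations." else "You listen with the understanding that comes from having lived through similar experiences.")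
      = pvResponses.getD (if 4 < (if 3 < (if 2 < (if 1 < (if 0 < pvResponses.length - 1 ∧ b0 = true then 0 else pvResponses.length - 1) ∧ b1 = true then 1 else (if 0 < pvResponses.length - 1 ∧ b0 = true then 0 else pvResponses.length - 1)) ∧ b2 = true then 2 else (if 1 < (if 0 < pvResponses.length - 1 ∧ b0 = true then 0 else pvResponses.length - 1) ∧ b1 = true then 1 else (if 0 < pvResponses.length - 1 ∧ b0 = true then 0 else pvResponses.length - 1))) ∧ b3 = true then 3 else (if 2 < (if 1 < (if 0 < pvResponses.length - 1 ∧ b0 = true then 0 else pvResponses.length - 1) ∧ b1 = true then 1 else (if 0 < pvResponses.length - 1 ∧ b0 = true then 0 else pvResponses.length - 1)) ∧ b2 = true then 2 else (if 1 < (if 0 < pvResponses.length - 1 ∧ b0 = true then 0 else pvResponses.length - 1) ∧ b1 = true then 1 else (if 0 < pvResponses.length - 1 ∧ b0 = true then 0 else pvResponses.length - 1)))) ∧ b4 = true then 4 else (if 3 < (if 2 < (if 1 < (if 0 < pvResponses.length - 1 ∧ b0 = true then 0 else pvResponses.length - 1) ∧ b1 = true then 1 else (if 0 < pvResponses.length -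 1 ∧ b0 = true then 0 else pvResponses.length - 1)) ∧ b2 = true then 2 else (if 1 < (if 0 < pvResponses.length - 1 ∧ b0 = true then 0 else pvResponses.length - 1) ∧ b1 = true then 1 else (if 0 < pvResponses.length - 1 ∧ b0 = true then 0 else pvResponses.length - 1))) ∧ b3 = true then 3 else (if 2 < (if 1 < (if 0 < pvResponses.length - 1 ∧ b0 = true then 0 else pvResponses.length - 1) ∧ b1 = true then 1 else (if 0 < pvResponses.length - 1 ∧ b0 = true then 0 else pvResponses.length - 1)) ∧ b2 = true then 2 else (if 1 < (if 0 < pvResponses.length - 1 ∧ b0 = true then 0 else pvResponses.length - 1) ∧ b1 = true then 1 else (if 0 < pvResponses.length - 1 ∧ b0 = true then 0 else pvResponses.length - 1))))) "" := by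
  cases b0 <;> cases b1 <;> cases b2 <;> cases b3 <;> cases b4 <;> rfl

theorem detect_emotional_context_spec : Claim_equal_detect_emotional_context := by
  intro message _
  unfold Spec_detect_emotional_context detect_emotional_context detect_emotional_context_alt
  set m := PySem.Str.lower message with hm
  have hsplit : pvKeywordCat
      = [("stressed", 0), ("anxious", 0), ("worried", 0), ("overwhelmed", 0), ("scared", 0), ("panic", 0)]
        ++ [("excited", 1), ("happy", 1), ("amazing", 1), ("great", 1), ("wonderful", 1), ("fantastic", 1)]
        ++ [("confused", 2), ("lost", 2), ("stuck", 2), ("don't know", 2), ("unsure", 2), ("help", 2)]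
        ++ [("sad", 3), ("disappointed", 3), ("failed", 3), ("giving up", 3), ("hopeless", 3)]
        ++ [("goal", 4), ("dream", 4), ("want to", 4), ("planning", 4), ("future", 4), ("hope", 4)] := rfl
  rw [hsplit]
  simp only [List.foldl_append]
  rw [pvFold_const m 4 _ (by decide), pvFold_const m 3 _ (by decide),
      pvFold_const m 2 _ (by decide), pvFold_const m 1 _ (by decide),
      pvFold_const m 0 _ (by decide)]
  simp only [List.any_cons, List.any_nil]
  exact pvChain _ _ _ _ _
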